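-- pv_equiv track=rewrite | github.com/chrisiweb/Parhamer_connection | worksheet_wizard.py | number_to_placevalue
-- ===== SOURCE A (Python) =====
-- list_stellenwerte = ['ht', 'zt','t','h','z','E', 'Z', 'H', 'T', 'ZT', 'HT', 'M', 'ZM', 'HM', 'Md', 'ZMd', 'HMd', 'B', 'ZB', 'HB']
--
-- index_E = 5
--
-- def number_to_placevalue(number):
--     list_digits = []
--     list_decimals = []
--     decimals=False
--     for all in str(number):
--         if all == ".":
--             decimals = True
--         elif decimals == False:
--             list_digits.append(all)
--         elif decimals == True:
--             list_decimals.append(all)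
--
--     complete_string_list=[]
--     for i, all in enumerate(reversed(list_digits)):
--         if int(all) != 0:
--             string = f"{all}{list_stellenwerte[index_E+i]}"
--             complete_string_list.insert(0, string)
--
--
--     if list_decimals != []:
--         for i, all in enumerate(list_decimals):
--             if int(all) != 0:
--                 string = f"{all}{list_stellenwerte[index_E-(i+1)]}"
--                 complete_string_list.append(string)
--
--     return complete_string_list
-- ===== SOURCE B (Python) =====
-- list_stellenwerte = ['ht', 'zt','t','h','z','E', 'Z', 'H', 'T', 'ZT', 'HT', 'M', 'ZM', 'HM', 'Md', 'ZMd', 'HMd', 'B', 'ZB', 'HB']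
--
-- index_E = 5
--
-- def number_to_placevalue(number):
--     s = str(number)
--     dot = s.find(".")
--     int_len = dot if dot != -1 else len(s)
--     exp = int_len - 1
--     out = []
--     for ch in s:
--         if ch == ".":
--             continue
--         if int(ch) != 0:
--             out.append(f"{ch}{list_stellenwerte[index_E + exp]}")
--         exp -= 1
--     return out
-- ===== Notes on version B (the rewrite author's own statement) =====
-- stated objective: simpler
-- what changed: Replaces A's three passes (split into digit/decimal lists with a flag, a reversed pass building the result with insert(0,...), and a separate decimal pass) by one forward pass over str(number) driven by a running place-value exponent; the Int argument type is the one required by the task.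
import Mathlib
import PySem

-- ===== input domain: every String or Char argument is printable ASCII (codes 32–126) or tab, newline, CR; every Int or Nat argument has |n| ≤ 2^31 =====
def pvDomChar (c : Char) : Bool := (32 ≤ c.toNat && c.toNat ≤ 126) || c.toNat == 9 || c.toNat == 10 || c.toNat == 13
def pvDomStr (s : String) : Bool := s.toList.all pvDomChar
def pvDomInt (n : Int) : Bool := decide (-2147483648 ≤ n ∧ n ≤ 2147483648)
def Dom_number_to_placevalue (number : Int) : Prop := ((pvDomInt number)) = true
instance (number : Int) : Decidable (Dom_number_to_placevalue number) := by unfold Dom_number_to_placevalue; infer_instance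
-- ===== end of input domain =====

-- B replaces A's split-into-two-lists + reversed pass with insert(0,…) + separate decimal
-- pass by ONE forward pass over str(number) driven by a running exponent (objective: simpler).

-- module constants shared by both Pythons
def pvStellen : List String :=
  ["ht", "zt", "t", "h", "z", "E", "Z", "H", "T", "ZT", "HT", "M", "ZM", "HM", "Md", "ZMd", "HMd", "B", "ZB", "HB"]

def pvIndexE : Int := 5

-- int(ch) for a one-character string; none (Python ValueError, e.g. on '-') is excluded by Pre_
def pvDigitVal (c : Char) : Int := (PySem.Int.ofChars? [c]).getD 0

-- f"{ch}{list_stellenwerte[k]}" with Python indexing; getD "" is the IndexError case, unreachable here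
def pvEntry (c : Char) (k : Int) : String := String.ofList [c] ++ (PySem.List.pyGet? pvStellen k).getD ""

-- ===== PORT A =====
-- for i, all in enumerate(reversed(list_digits)): if int(all) != 0: complete_string_list.insert(0, string)
def pvALoop : List Char → Int → List String → List String
  | [], _, acc => acc
  | c :: cs, i, acc =>
      pvALoop cs (i + 1) (if pvDigitVal c ≠ 0 then pvEntry c (pvIndexE + i) :: acc else acc)

-- for i, all in enumerate(list_decimals): if int(all) != 0: complete_string_list.append(string)
def pvDecLoop : List Char → Int → List String → List String
  | [], _, acc => acc
  | c :: cs, i, acc =>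
      pvDecLoop cs (i + 1) (if pvDigitVal c ≠ 0 then acc ++ [pvEntry c (pvIndexE - (i + 1))] else acc)

def number_to_placevalue (number : Int) : List String :=
  -- first loop: split str(number) into list_digits / list_decimals with the `decimals` flag
  let st := (PySem.Int.toStr number).toList.foldl
      (fun (st : List Char × List Char × Bool) ch =>
        if ch = '.' then (st.1, st.2.1, true)
        else if st.2.2 = false then (st.1 ++ [ch], st.2.1, st.2.2)
        else (st.1, st.2.1 ++ [ch], st.2.2))
      ([], [], false)
  let csl := pvALoop st.1.reverse 0 []
  if st.2.1 ≠ [] then pvDecLoop st.2.1 0 csl else csl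

-- ===== PORT B =====
-- for ch in s: if ch == '.': continue; if int(ch) != 0: out.append(…); exp -= 1
def pvBLoop : List Char → Int → List String → List String
  | [], _, acc => acc
  | c :: cs, e, acc =>
      if c = '.' then pvBLoop cs e acc
      else pvBLoop cs (e - 1) (if pvDigitVal c ≠ 0 then acc ++ [pvEntry c (pvIndexE + e)] else acc)

def number_to_placevalue_alt (number : Int) : List String :=
  let s := (PySem.Int.toStr number).toList
  let dot := PySem.Chars.find s ['.']
  let intLen : Int := if dot ≠ -1 then dot else (s.length : Int)
  pvBLoop s (intLen - 1) []

-- ===== PRECONDITION & SPEC =====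
-- Pre_ excludes ONLY negative integers: there str(number) starts with '-' and A raises
-- ValueError at int('-') (B raises the same way). On every non-negative Int — the whole
-- rest of this task's Int argument type — A returns normally and the claim covers it.
def Pre_number_to_placevalue (number : Int) : Prop := 0 ≤ number
instance (number : Int) : Decidable (Pre_number_to_placevalue number) := by unfold Pre_number_to_placevalue; infer_instance
def pvWitness_number_to_placevalue : Int := 507

def Spec_number_to_placevalue (number : Int) (out : List String) : Prop := out = number_to_placevalue_alt number
instance (number : Int) (out : List String) : Decidable (Spec_number_to_placevalue number out) := by unfold Spec_number_to_placevalue; infer_instance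

-- ===== CLAIM (what is proved, stated in full; the proofs are below) =====
def Claim_equal_number_to_placevalue : Prop := ∀ (number : Int), Dom_number_to_placevalue number → Pre_number_to_placevalue number → Spec_number_to_placevalue number (number_to_placevalue number)

-- ===== LEMMAS AND PROOFS =====

-- str(n) never contains '.'
theorem pv_digitChar_ne_dot (m : Nat) : Nat.digitChar m ≠ '.' := by
  rcases Nat.lt_or_ge m 16 with h | h
  · interval_cases m <;> decide
  · have hne : ∀ k, k < 16 → m ≠ k := by omega
    unfold Nat.digitChar
    rw [if_neg (hne 0 (by norm_num)), if_neg (hne 1 (by norm_num)), if_neg (hne 2 (by norm_num)), if_neg (hne 3 (by norm_num)), if_neg (hne 4 (by norm_num)), if_neg (hne 5 (by norm_num)), if_neg (hne 6 (by norm_num)), if_neg (hne 7 (by norm_num)), if_neg (hne 8 (by norm_num)), if_neg (hne 9 (by norm_num)), if_neg (hne 10 (by norm_num)), if_neg (hne 11 (by norm_num)), if_neg (hne 12 (by norm_num)), if_neg (hne 13 (by norm_num)), if_neg (hne 14 (by norm_num)), if_neg (hne 15 (by norm_num))]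
    decide

theorem pv_toDigitsCore_no_dot (b fuel n : Nat) (acc : List Char) (h : '.' ∉ acc) :
    '.' ∉ Nat.toDigitsCore b fuel n acc := by
  induction fuel generalizing n acc with
  | zero => simpa [Nat.toDigitsCore] using h
  | succ f ih =>
      simp only [Nat.toDigitsCore]
      split
      · intro hc
        rcases List.mem_cons.mp hc with hc | hc
        · exact pv_digitChar_ne_dot _ hc.symm
        · exact h hc
      · exact ih _ _ (by
          intro hc
          rcases List.mem_cons.mp hc with hc | hc
          · exact pv_digitChar_ne_dot _ hc.symm
          · exact h hc)

theorem pv_toChars_no_dot (n : Int) (h : 0 ≤ n) : '.' ∉ PySem.Int.toChars n := by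
  unfold PySem.Int.toChars Nat.toDigits
  rw [if_neg (by omega)]
  exact pv_toDigitsCore_no_dot _ _ _ _ (by simp)

-- A's splitting loop on a dot-free string keeps everything in list_digits
theorem pv_split_no_dot (l : List Char) (h : '.' ∉ l) (d : List Char) :
    l.foldl
      (fun (st : List Char × List Char × Bool) ch =>
        if ch = '.' then (st.1, st.2.1, true)
        else if st.2.2 = false then (st.1 ++ [ch], st.2.1, st.2.2)
        else (st.1, st.2.1 ++ [ch], st.2.2))
      (d, [], false) = (d ++ l, [], false) := by
  induction l generalizing d with
  | nil => simp
  | cons c cs ih =>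
      have hc : c ≠ '.' := fun hc => h (hc ▸ List.mem_cons_self)
      simp only [List.foldl_cons, if_neg hc, if_true]
      rw [ih (fun hm => h (List.mem_cons_of_mem _ hm))]
      simp

-- B's accumulator distributes
theorem pv_bLoop_acc (l : List Char) (e : Int) (a : List String) :
    pvBLoop l e a = a ++ pvBLoop l e [] := by
  induction l generalizing e a with
  | nil => simp [pvBLoop]
  | cons c cs ih =>
      by_cases hc : c = '.'
      · simp only [pvBLoop, if_pos hc]
        exact ih e a
      · simp only [pvBLoop, if_neg hc]
        rw [ih (e - 1) (if pvDigitVal c ≠ 0 then a ++ [pvEntry c (pvIndexE + e)] else a),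
          ih (e - 1) (if pvDigitVal c ≠ 0 then [] ++ [pvEntry c (pvIndexE + e)] else [])]
        split_ifs <;> simp

-- A's reversed loop over an appended block
theorem pv_aLoop_append (xs ys : List Char) (i : Int) (acc : List String) :
    pvALoop (xs ++ ys) i acc = pvALoop ys (i + xs.length) (pvALoop xs i acc) := by
  induction xs generalizing i acc with
  | nil => simp [pvALoop]
  | cons c cs ih =>
      simp only [List.cons_append, pvALoop, ih]
      rw [show i + 1 + (cs.length : Int) = i + ((c :: cs).length : Int) from by
        push_cast [List.length_cons]; ring]

-- core equivalence: A's reversed pass with prepends = B's forward pass with appends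
theorem pv_main (l : List Char) (h : '.' ∉ l) (i : Int) (acc : List String) :
    pvALoop l.reverse i acc = pvBLoop l ((l.length : Int) - 1 + i) [] ++ acc := by
  induction l generalizing i acc with
  | nil => simp [pvALoop, pvBLoop]
  | cons c cs ih =>
      have hc : c ≠ '.' := fun hc => h (hc ▸ List.mem_cons_self)
      have hcs : '.' ∉ cs := fun hm => h (List.mem_cons_of_mem _ hm)
      rw [List.reverse_cons, pv_aLoop_append, pvALoop, pvALoop, ih hcs]
      have he : ((c :: cs).length : Int) - 1 + i = (cs.length : Int) + i := by
        push_cast [List.length_cons]; ring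
      have hk : pvIndexE + (i + (cs.reverse.length : Int)) = pvIndexE + ((cs.length : Int) + i) := by
        push_cast [List.length_reverse]; ring
      rw [pvBLoop, if_neg hc, he, hk,
        pv_bLoop_acc cs ((cs.length : Int) + i - 1)
          (if pvDigitVal c ≠ 0 then [] ++ [pvEntry c (pvIndexE + ((cs.length : Int) + i))] else []),
        show (cs.length : Int) + i - 1 = (cs.length : Int) - 1 + i from by ring]
      split_ifs <;> simp

-- find = -1 on a dot-free string
theorem pv_find_dot (l : List Char) (h : '.' ∉ l) : PySem.Chars.find l ['.'] = -1 := by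
  rw [PySem.Chars.find_eq_neg_one_iff]
  intro hinf
  exact h (hinf.mem List.mem_cons_self)

-- ===== VERDICT (by name: the statement is the Claim_ definition above) =====
theorem number_to_placevalue_spec : Claim_equal_number_to_placevalue := by
  intro n _ hpre
  unfold Spec_number_to_placevalue number_to_placevalue number_to_placevalue_alt
  have hs : (PySem.Int.toStr n).toList = PySem.Int.toChars n := PySem.Int.toList_toStr n
  have hnd : '.' ∉ (PySem.Int.toStr n).toList := hs ▸ pv_toChars_no_dot n hpre
  rw [pv_split_no_dot _ hnd]
  simp only [List.nil_append, ne_eq, not_true_eq_false, if_false, pv_find_dot _ hnd]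
  simpa using pv_main _ hnd 0 []
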